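-- pv_equiv track=rewrite | github.com/HanzoRazer/code-analysis-tool | src/code_audit/policy/exit_codes.py | worst_severity_from_counts
-- ===== SOURCE A (Python) =====
-- from typing import Literal
--
-- Severity = Literal["NONE", "LOW", "MEDIUM", "HIGH", "CRITICAL"]
--
-- _SEV_RANK: dict[Severity, int] = {
--     "NONE": 0,
--     "LOW": 1,
--     "MEDIUM": 2,
--     "HIGH": 3,
--     "CRITICAL": 4,
-- }
--
-- def _normalize_severity(value: str | None) -> Severity:
--     """Normalize a raw severity string to a canonical ``Severity`` literal.
--
--     Unknown or missing values are treated as ``CRITICAL`` (fail-safe in CI).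
--     """
--     if not value:
--         return "NONE"
--     v = value.strip().upper()
--     if v in _SEV_RANK:
--         return v  # type: ignore[return-value]
--     # Unknown values are treated as worst-case for safety in CI.
--     return "CRITICAL"
--
-- def worst_severity_from_counts(by_severity: dict[str, int] | None) -> str | None:
--     """Derive the worst severity present from a ``by_severity`` counts dict.
--
--     The ``by_severity`` dict maps lowercase severity names (e.g. ``"high"``)
--     to their counts.  Returns the worst severity with a non-zero count,
--     or ``None`` if no findings are present.
--     """
--     if not by_severity:
--         return None
--     worst: str | None = None
--     worst_rank = -1
--     for sev_str, count in by_severity.items():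
--         if not count:
--             continue
--         normalized = _normalize_severity(sev_str)
--         rank = _SEV_RANK[normalized]
--         if rank > worst_rank:
--             worst_rank = rank
--             worst = normalized
--     return worst
-- ===== SOURCE B (Python) =====
-- _SEV_RANK = {
--     "NONE": 0,
--     "LOW": 1,
--     "MEDIUM": 2,
--     "HIGH": 3,
--     "CRITICAL": 4,
-- }
--
-- def _normalize_severity(value):
--     if not value:
--         return "NONE"
--     v = value.strip().upper()
--     if v in _SEV_RANK:
--         return v
--     return "CRITICAL"
--
-- def worst_severity_from_counts(by_severity):
--     if not by_severity:
--         return None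
--     present = {_normalize_severity(s) for s, c in by_severity.items() if c}
--     for sev in ("CRITICAL", "HIGH", "MEDIUM", "LOW", "NONE"):
--         if sev in present:
--             return sev
--     return None
-- ===== Notes on version B (the rewrite author's own statement) =====
-- stated objective: alternative
-- what changed: Replaces the running-max loop (tracking worst name and rank) with building the set of normalized severities present with nonzero count in one pass and then probing a fixed descending priority order.
import Mathlib
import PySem

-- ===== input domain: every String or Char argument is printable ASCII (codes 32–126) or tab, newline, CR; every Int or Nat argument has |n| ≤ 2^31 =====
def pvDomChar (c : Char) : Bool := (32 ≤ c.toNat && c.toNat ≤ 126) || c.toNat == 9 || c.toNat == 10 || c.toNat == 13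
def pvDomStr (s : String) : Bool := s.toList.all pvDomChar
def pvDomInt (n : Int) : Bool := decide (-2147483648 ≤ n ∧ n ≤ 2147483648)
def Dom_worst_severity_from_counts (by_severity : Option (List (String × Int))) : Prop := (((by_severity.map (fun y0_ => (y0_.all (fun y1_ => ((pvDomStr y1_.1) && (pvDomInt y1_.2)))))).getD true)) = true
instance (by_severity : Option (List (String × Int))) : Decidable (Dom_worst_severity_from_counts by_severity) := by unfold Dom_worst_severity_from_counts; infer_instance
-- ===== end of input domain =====

-- B replaces A's running-max loop by a one-pass "set of normalized severities present" plus a probe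
-- in fixed descending priority order (objective: alternative decomposition, same cost).

-- ===== PORT A =====
-- _SEV_RANK (module constant, shared by both sources)
def sevRank : PySem.Dict String Int :=
  ⟨[("NONE", 0), ("LOW", 1), ("MEDIUM", 2), ("HIGH", 3), ("CRITICAL", 4)]⟩

-- _normalize_severity (helper shared verbatim by A and B)
-- v = value.strip().upper() is inlined (it is used twice, unchanged)
def normalizeSeverity (value : String) : String :=
  if value = "" then "NONE"
  else if sevRank.contains (PySem.Str.upper (PySem.Str.strip value)) then
    PySem.Str.upper (PySem.Str.strip value)
  else "CRITICAL"

-- the for-loop of A over items, carrying (worst, worst_rank)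
-- _SEV_RANK[normalized]: the key is always present (normalizeSeverity only returns keys of sevRank),
-- so getD with default 0 is exact (Python's KeyError is unreachable).
def worstLoop : List (String × Int) → Option String → Int → Option String
  | [], worst, _ => worst
  | (sevStr, count) :: rest, worst, worstRank =>
    if count = 0 then worstLoop rest worst worstRank
    else
      let normalized := normalizeSeverity sevStr
      let rank := sevRank.getD normalized 0
      if rank > worstRank then worstLoop rest (some normalized) rank
      else worstLoop rest worst worstRank

def worst_severity_from_counts (by_severity : Option (List (String × Int))) : Option String :=
  match by_severity with
  | none => none
  | some items => if items = [] then none else worstLoop items none (-1)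

-- ===== PORT B =====
-- the probe loop: for sev in ("CRITICAL", ...): if sev in present: return sev
def probeLoop : List String → PySem.Set String → Option String
  | [], _ => none
  | sev :: rest, present =>
    if PySem.Set.contains present sev then some sev else probeLoop rest present

def worst_severity_from_counts_alt (by_severity : Option (List (String × Int))) : Option String :=
  match by_severity with
  | none => none
  | some items =>
    if items = [] then none
    else
      let present : PySem.Set String :=
        PySem.Set.ofList ((items.filter (fun p => p.2 != 0)).map (fun p => normalizeSeverity p.1))
      probeLoop ["CRITICAL", "HIGH", "MEDIUM", "LOW", "NONE"] present

-- ===== PRECONDITION & SPEC =====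
def Spec_worst_severity_from_counts (by_severity : Option (List (String × Int))) (out : Option String) : Prop := out = worst_severity_from_counts_alt by_severity
instance (by_severity : Option (List (String × Int))) (out : Option String) : Decidable (Spec_worst_severity_from_counts by_severity out) := by unfold Spec_worst_severity_from_counts; infer_instance

-- ===== CLAIM (what is proved, stated in full; the proofs are below) =====
def Claim_equal_worst_severity_from_counts : Prop := ∀ (by_severity : Option (List (String × Int))), Dom_worst_severity_from_counts by_severity → Spec_worst_severity_from_counts by_severity (worst_severity_from_counts by_severity)

-- ===== LEMMAS AND PROOFS =====

-- rank of a raw severity string (what A computes for each active item)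
def rk (s : String) : Int := sevRank.getD (normalizeSeverity s) 0

-- canonical name of a rank (-1 ↦ none)
def nameOf? (r : Int) : Option String :=
  if r = 4 then some "CRITICAL" else if r = 3 then some "HIGH"
  else if r = 2 then some "MEDIUM" else if r = 1 then some "LOW"
  else if r = 0 then some "NONE" else none

theorem norm_cases (s : String) :
    normalizeSeverity s = "NONE" ∨ normalizeSeverity s = "LOW" ∨ normalizeSeverity s = "MEDIUM" ∨
    normalizeSeverity s = "HIGH" ∨ normalizeSeverity s = "CRITICAL" := by
  unfold normalizeSeverity
  by_cases h1 : s = ""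
  · simp [h1]
  · rw [if_neg h1]
    by_cases h2 : sevRank.contains (PySem.Str.upper (PySem.Str.strip s)) = true
    · rw [if_pos h2]
      simp only [sevRank, PySem.Dict.contains, List.any_cons, List.any_nil,
        Bool.or_eq_true, beq_iff_eq] at h2
      rcases h2 with h | h | h | h | h | h <;>
        first
        | exact absurd h Bool.false_ne_true
        | exact Or.inl h.symm
        | exact Or.inr (Or.inl h.symm)
        | exact Or.inr (Or.inr (Or.inl h.symm))
        | exact Or.inr (Or.inr (Or.inr (Or.inl h.symm)))
        | exact Or.inr (Or.inr (Or.inr (Or.inr h.symm)))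
    · rw [if_neg h2]
      exact Or.inr (Or.inr (Or.inr (Or.inr rfl)))

theorem rk_name (s : String) : nameOf? (rk s) = some (normalizeSeverity s) := by
  unfold rk
  rcases norm_cases s with h | h | h | h | h <;> rw [h] <;> decide

theorem rk_bounds (s : String) : 0 ≤ rk s ∧ rk s ≤ 4 := by
  unfold rk
  rcases norm_cases s with h | h | h | h | h <;> rw [h] <;> decide

theorem rk_of_name (s : String) (n : String) (h : normalizeSeverity s = n) :
    rk s = sevRank.getD n 0 := by
  unfold rk; rw [h]

-- the rank projection of A's loop
def fMax : List (String × Int) → Int → Int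
  | [], r => r
  | (s, c) :: rest, r =>
    if c = 0 then fMax rest r
    else if rk s > r then fMax rest (rk s) else fMax rest r

theorem worstLoop_char (l : List (String × Int)) : ∀ r : Int,
    worstLoop l (nameOf? r) r = nameOf? (fMax l r) := by
  induction l with
  | nil => intro r; rfl
  | cons p rest ih =>
    intro r
    obtain ⟨s, c⟩ := p
    by_cases hc : c = 0
    · simp [worstLoop, fMax, hc, ih]
    · by_cases hr : rk s > r
      · have hr' : sevRank.getD (normalizeSeverity s) 0 > r := hr
        have e1 : worstLoop ((s, c) :: rest) (nameOf? r) r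
            = worstLoop rest (some (normalizeSeverity s)) (sevRank.getD (normalizeSeverity s) 0) := by
          simp [worstLoop, hc, hr']
        have e2 : fMax ((s, c) :: rest) r = fMax rest (rk s) := by
          simp [fMax, hc, hr]
        rw [e1, ← rk_name s, show sevRank.getD (normalizeSeverity s) 0 = rk s from rfl, ih, e2]
      · have hr' : ¬ sevRank.getD (normalizeSeverity s) 0 > r := hr
        have e1 : worstLoop ((s, c) :: rest) (nameOf? r) r = worstLoop rest (nameOf? r) r := by
          simp [worstLoop, hc, hr']
        have e2 : fMax ((s, c) :: rest) r = fMax rest r := by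
          simp [fMax, hc, hr]
        rw [e1, ih, e2]

theorem fMax_ge (l : List (String × Int)) : ∀ r : Int, r ≤ fMax l r := by
  induction l with
  | nil => intro r; simp [fMax]
  | cons p rest ih =>
    intro r
    obtain ⟨s, c⟩ := p
    by_cases hc : c = 0
    · simpa [fMax, hc] using ih r
    · by_cases hr : rk s > r
      · have := ih (rk s); simp [fMax, hc, hr]; omega
      · simpa [fMax, hc, hr] using ih r

theorem fMax_mem (l : List (String × Int)) : ∀ r : Int,
    fMax l r = r ∨ ∃ p ∈ l, p.2 ≠ 0 ∧ rk p.1 = fMax l r := by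
  induction l with
  | nil => intro r; exact Or.inl rfl
  | cons p rest ih =>
    intro r
    obtain ⟨s, c⟩ := p
    by_cases hc : c = 0
    · rcases ih r with h | ⟨q, hq, hq2, hq3⟩
      · exact Or.inl (by simpa [fMax, hc] using h)
      · exact Or.inr ⟨q, List.mem_cons_of_mem _ hq, hq2, by simpa [fMax, hc] using hq3⟩
    · by_cases hr : rk s > r
      · rcases ih (rk s) with h | ⟨q, hq, hq2, hq3⟩
        · refine Or.inr ⟨(s, c), List.mem_cons_self, hc, ?_⟩
          simp [fMax, hc, hr, h]
        · exact Or.inr ⟨q, List.mem_cons_of_mem _ hq, hq2, by simpa [fMax, hc, hr] using hq3⟩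
      · rcases ih r with h | ⟨q, hq, hq2, hq3⟩
        · exact Or.inl (by simpa [fMax, hc, hr] using h)
        · exact Or.inr ⟨q, List.mem_cons_of_mem _ hq, hq2, by simpa [fMax, hc, hr] using hq3⟩

theorem fMax_ub (l : List (String × Int)) : ∀ r : Int, ∀ p ∈ l, p.2 ≠ 0 → rk p.1 ≤ fMax l r := by
  induction l with
  | nil => intro r p hp; simp at hp
  | cons q rest ih =>
    intro r p hp hp2
    obtain ⟨s, c⟩ := q
    rcases List.mem_cons.mp hp with h | h
    · subst h
      simp only [ne_eq] at hp2
      by_cases hr : rk s > r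
      · have h1 := fMax_ge rest (rk s)
        simp [fMax, hp2, hr]
        omega
      · have h1 := fMax_ge rest r
        simp [fMax, hp2, hr]
        omega
    · by_cases hc : c = 0
      · simpa [fMax, hc] using ih r p h hp2
      · by_cases hr : rk s > r
        · simpa [fMax, hc, hr] using ih (rk s) p h hp2
        · simpa [fMax, hc, hr] using ih r p h hp2

-- membership in B's "present" set, in terms of the raw items
theorem mem_present (items : List (String × Int)) (x : String) :
    (x ∈ PySem.Set.ofList ((items.filter (fun p => p.2 != 0)).map (fun p => normalizeSeverity p.1)))
      ↔ ∃ p ∈ items, p.2 ≠ 0 ∧ normalizeSeverity p.1 = x := by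
  rw [PySem.Set.mem_ofList]
  simp only [List.mem_map, List.mem_filter, bne_iff_ne, ne_eq]
  constructor
  · rintro ⟨⟨a, b⟩, ⟨hm, hb⟩, hx⟩; exact ⟨(a, b), hm, hb, hx⟩
  · rintro ⟨⟨a, b⟩, hm, hb, hx⟩; exact ⟨(a, b), ⟨hm, hb⟩, hx⟩

-- B's probe returns the canonical name of the maximal present rank
theorem probe_char (items : List (String × Int)) :
    probeLoop ["CRITICAL", "HIGH", "MEDIUM", "LOW", "NONE"]
      (PySem.Set.ofList ((items.filter (fun p => p.2 != 0)).map (fun p => normalizeSeverity p.1)))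
      = nameOf? (fMax items (-1)) := by
  set present := PySem.Set.ofList ((items.filter (fun p => p.2 != 0)).map (fun p => normalizeSeverity p.1)) with hpres
  have hmem : ∀ x, x ∈ present ↔ ∃ p ∈ items, p.2 ≠ 0 ∧ normalizeSeverity p.1 = x := by
    intro x
    rw [hpres]
    exact mem_present items x
  have hub : ∀ p ∈ items, p.2 ≠ 0 → rk p.1 ≤ fMax items (-1) := fMax_ub items (-1)
  have hnot : ∀ x, sevRank.getD x 0 > fMax items (-1) → x ∉ present := by
    intro x hx
    rw [hmem]
    rintro ⟨p, hp, hp2, hp3⟩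
    have h1 := hub p hp hp2
    rw [rk_of_name p.1 x hp3] at h1
    omega
  rcases fMax_mem items (-1) with h0 | ⟨p, hp, hp2, hp3⟩
  · -- no active item: fMax = -1, every name is absent
    have hnone : ∀ x, x ∉ present := by
      intro x
      rw [hmem]
      rintro ⟨p, hp, hp2, _⟩
      have h1 := hub p hp hp2
      have h2 := (rk_bounds p.1).1
      omega
    rw [h0]
    simp [probeLoop, hnone, nameOf?]
  · -- fMax is the rank of some active item; its normalized name is present
    have hb := rk_bounds p.1
    have hge : (-1 : Int) ≤ fMax items (-1) := fMax_ge items (-1)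
    have hin : ∀ x, normalizeSeverity p.1 = x → x ∈ present := by
      intro x hx; rw [hmem]; exact ⟨p, hp, hp2, hx⟩
    generalize hM : fMax items (-1) = m at hp3 hnot hge ⊢
    have hname : nameOf? m = some (normalizeSeverity p.1) := by rw [← hp3]; exact rk_name p.1
    have hle : m ≤ 4 := by omega
    interval_cases m
    · omega
    · have hx : normalizeSeverity p.1 = "NONE" := by
        simp only [nameOf?] at hname; norm_num at hname; exact hname.symm
      simp [probeLoop, hin _ hx, hnot "CRITICAL" (by decide), hnot "HIGH" (by decide),
        hnot "MEDIUM" (by decide), hnot "LOW" (by decide), nameOf?]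
    · have hx : normalizeSeverity p.1 = "LOW" := by
        simp only [nameOf?] at hname; norm_num at hname; exact hname.symm
      simp [probeLoop, hin _ hx, hnot "CRITICAL" (by decide), hnot "HIGH" (by decide),
        hnot "MEDIUM" (by decide), nameOf?]
    · have hx : normalizeSeverity p.1 = "MEDIUM" := by
        simp only [nameOf?] at hname; norm_num at hname; exact hname.symm
      simp [probeLoop, hin _ hx, hnot "CRITICAL" (by decide), hnot "HIGH" (by decide), nameOf?]
    · have hx : normalizeSeverity p.1 = "HIGH" := by
        simp only [nameOf?] at hname; norm_num at hname; exact hname.symm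
      simp [probeLoop, hin _ hx, hnot "CRITICAL" (by decide), nameOf?]
    · have hx : normalizeSeverity p.1 = "CRITICAL" := by
        simp only [nameOf?] at hname; norm_num at hname; exact hname.symm
      simp [probeLoop, hin _ hx, nameOf?]

-- ===== VERDICT (by name: the statement is the Claim_ definition above) =====
theorem worst_severity_from_counts_spec : Claim_equal_worst_severity_from_counts := by
  intro by_severity _
  unfold Spec_worst_severity_from_counts
  match by_severity with
  | none => rfl
  | some items =>
    by_cases h : items = []
    · simp [worst_severity_from_counts, worst_severity_from_counts_alt, h]
    · simp only [worst_severity_from_counts, worst_severity_from_counts_alt, if_neg h]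
      have e := worstLoop_char items (-1)
      rw [show (nameOf? (-1)) = none from rfl] at e
      rw [e]
      exact (probe_char items).symm
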